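-- pv_equiv track=rewrite | github.com/KrystianMank/tpm_taw_4 | funkcje_cw2.py | staty
-- ===== SOURCE A (Python) =====
-- def staty(tekst):
--     slownik={"litery":0,"cyfry":0,"spacje":0,"wyrazy":0}
--
--     for litera in tekst:
--         if litera.isalpha():
--             slownik['litery'] += 1
--         elif litera.isdigit():
--             slownik["cyfry"] +=1
--         elif litera.isspace():
--             slownik["spacje"]+=1
--     slownik['wyrazy']=len(tekst.split())
--
--     return slownik
-- ===== SOURCE B (Python) =====
-- def staty(tekst):
--     # One independent pass per category (categories are mutually exclusive),
--     # instead of a single branching loop mutating a dict.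
--     return {
--         "litery": sum(1 for c in tekst if c.isalpha()),
--         "cyfry": sum(1 for c in tekst if c.isdigit()),
--         "spacje": sum(1 for c in tekst if c.isspace()),
--         "wyrazy": len(tekst.split()),
--     }
-- ===== Notes on version B (the rewrite author's own statement) =====
-- stated objective: idiomatic
-- what changed: Replaces the single stateful elif-branching loop over a mutable dict with four independent specialised passes (three comprehension counts and len(split())), building the dict in one expression; correct because alpha/digit/space are mutually exclusive.
import Mathlib
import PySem

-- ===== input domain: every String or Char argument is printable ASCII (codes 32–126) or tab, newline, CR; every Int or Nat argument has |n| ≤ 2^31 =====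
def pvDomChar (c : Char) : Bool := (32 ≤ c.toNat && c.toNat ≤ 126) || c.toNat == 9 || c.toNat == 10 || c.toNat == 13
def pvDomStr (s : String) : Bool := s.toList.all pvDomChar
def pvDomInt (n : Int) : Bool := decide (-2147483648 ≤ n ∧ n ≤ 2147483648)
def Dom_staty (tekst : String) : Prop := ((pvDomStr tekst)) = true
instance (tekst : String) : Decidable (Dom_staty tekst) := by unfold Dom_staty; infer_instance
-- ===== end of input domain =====

-- B replaces A's single elif-branching loop over a mutable dict with four independent
-- specialised counting passes (idiomatic decomposition; same O(n) cost).


-- ===== PORT A =====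
-- builds the dict with all four keys, then one loop incrementing the matching key
-- (elif chain), then sets 'wyrazy' to len(tekst.split()); returns the dict's items.
def staty (tekst : String) : List (String × Int) :=
  ((tekst.toList.foldl (fun d litera =>
      if PySem.Chars.isalpha litera then d.insert "litery" (d.getD "litery" 0 + 1)
      else if PySem.Chars.isdigit litera then d.insert "cyfry" (d.getD "cyfry" 0 + 1)
      else if PySem.Chars.isspace litera then d.insert "spacje" (d.getD "spacje" 0 + 1)
      else d)
    (PySem.Dict.ofList [("litery", 0), ("cyfry", 0), ("spacje", 0), ("wyrazy", 0)] : PySem.Dict String Int)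
   ).insert "wyrazy" ((PySem.Str.split₀ tekst).length : Int)).items

-- ===== PORT B =====
-- four independent passes, one per category; dict built in one expression
def staty_alt (tekst : String) : List (String × Int) :=
  [("litery", (tekst.toList.countP (fun c => PySem.Chars.isalpha c) : Int)),
   ("cyfry",  (tekst.toList.countP (fun c => PySem.Chars.isdigit c) : Int)),
   ("spacje", (tekst.toList.countP (fun c => PySem.Chars.isspace c) : Int)),
   ("wyrazy", ((PySem.Str.split₀ tekst).length : Int))]

-- ===== PRECONDITION & SPEC =====
def Spec_staty (tekst : String) (out : List (String × Int)) : Prop := out = staty_alt tekst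
instance (tekst : String) (out : List (String × Int)) : Decidable (Spec_staty tekst out) := by unfold Spec_staty; infer_instance

-- ===== CLAIM (what is proved, stated in full; the proofs are below) =====
def Claim_equal_staty : Prop := ∀ (tekst : String), Dom_staty tekst → Spec_staty tekst (staty tekst)

-- ===== LEMMAS AND PROOFS =====

theorem isalpha_of_isdigit (c : Char) (h : PySem.Chars.isdigit c = true) :
    PySem.Chars.isalpha c = false := by
  simp [PySem.Chars.isdigit, PySem.Chars.isalpha, PySem.Chars.isupper, PySem.Chars.islower,
    Char.le_def, UInt32.le_iff_toNat_le] at *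
  omega

theorem isalpha_of_isspace (c : Char) (h : PySem.Chars.isspace c = true) :
    PySem.Chars.isalpha c = false := by
  simp [PySem.Chars.isspace, PySem.Chars.isalpha, PySem.Chars.isupper, PySem.Chars.islower,
    Char.le_def, UInt32.le_iff_toNat_le] at *
  omega

theorem isdigit_of_isspace (c : Char) (h : PySem.Chars.isspace c = true) :
    PySem.Chars.isdigit c = false := by
  simp [PySem.Chars.isspace, PySem.Chars.isdigit, Char.le_def, UInt32.le_iff_toNat_le] at *
  omega

-- A's loop on a four-key literal dict, characterised with the elif-chain predicates
theorem staty_loop (l : List Char) (a b c w : Int) :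
    l.foldl (fun d litera =>
      if PySem.Chars.isalpha litera then d.insert "litery" (d.getD "litery" 0 + 1)
      else if PySem.Chars.isdigit litera then d.insert "cyfry" (d.getD "cyfry" 0 + 1)
      else if PySem.Chars.isspace litera then d.insert "spacje" (d.getD "spacje" 0 + 1)
      else d)
      (PySem.Dict.mk [("litery", a), ("cyfry", b), ("spacje", c), ("wyrazy", w)])
    = PySem.Dict.mk
      [("litery", a + (l.countP (fun x => PySem.Chars.isalpha x) : Int)),
       ("cyfry",  b + (l.countP (fun x => !PySem.Chars.isalpha x && PySem.Chars.isdigit x) : Int)),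
       ("spacje", c + (l.countP (fun x => !PySem.Chars.isalpha x && !PySem.Chars.isdigit x && PySem.Chars.isspace x) : Int)),
       ("wyrazy", w)] := by
  induction l generalizing a b c with
  | nil => simp
  | cons x l ih =>
    simp only [List.foldl_cons]
    by_cases ha : PySem.Chars.isalpha x = true
    · rw [show (if PySem.Chars.isalpha x then
          (PySem.Dict.mk [("litery", a), ("cyfry", b), ("spacje", c), ("wyrazy", w)]).insert "litery"
            ((PySem.Dict.mk [("litery", a), ("cyfry", b), ("spacje", c), ("wyrazy", w)]).getD "litery" 0 + 1)
          else if PySem.Chars.isdigit x then _ else if PySem.Chars.isspace x then _ else _)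
        = PySem.Dict.mk [("litery", a + 1), ("cyfry", b), ("spacje", c), ("wyrazy", w)] by
          simp [ha, PySem.Dict.insert, PySem.Dict.contains, PySem.Dict.getD, PySem.Dict.get?]]
      rw [ih]
      simp [List.countP_cons, ha]
      omega
    · by_cases hd : PySem.Chars.isdigit x = true
      · rw [show (if PySem.Chars.isalpha x then _ else if PySem.Chars.isdigit x then
            (PySem.Dict.mk [("litery", a), ("cyfry", b), ("spacje", c), ("wyrazy", w)]).insert "cyfry"
              ((PySem.Dict.mk [("litery", a), ("cyfry", b), ("spacje", c), ("wyrazy", w)]).getD "cyfry" 0 + 1)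
            else if PySem.Chars.isspace x then _ else _)
          = PySem.Dict.mk [("litery", a), ("cyfry", b + 1), ("spacje", c), ("wyrazy", w)] by
            simp [ha, hd, PySem.Dict.insert, PySem.Dict.contains, PySem.Dict.getD, PySem.Dict.get?]]
        rw [ih]
        simp [List.countP_cons, ha, hd]
        omega
      · by_cases hs : PySem.Chars.isspace x = true
        · rw [show (if PySem.Chars.isalpha x then _ else if PySem.Chars.isdigit x then _
              else if PySem.Chars.isspace x then
              (PySem.Dict.mk [("litery", a), ("cyfry", b), ("spacje", c), ("wyrazy", w)]).insert "spacje"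
                ((PySem.Dict.mk [("litery", a), ("cyfry", b), ("spacje", c), ("wyrazy", w)]).getD "spacje" 0 + 1)
              else _)
            = PySem.Dict.mk [("litery", a), ("cyfry", b), ("spacje", c + 1), ("wyrazy", w)] by
              simp [ha, hd, hs, PySem.Dict.insert, PySem.Dict.contains, PySem.Dict.getD, PySem.Dict.get?]]
          rw [ih]
          simp [List.countP_cons, ha, hd, hs]
          omega
        · rw [if_neg ha, if_neg hd, if_neg hs, ih]
          simp [List.countP_cons, ha, hd, hs]

-- the elif-chain predicates coincide with the plain ones (categories are disjoint)
theorem countP_digit_eq (l : List Char) :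
    l.countP (fun x => !PySem.Chars.isalpha x && PySem.Chars.isdigit x)
    = l.countP (fun x => PySem.Chars.isdigit x) := by
  apply List.countP_congr
  intro x _
  by_cases hd : PySem.Chars.isdigit x = true
  · simp [hd, isalpha_of_isdigit x hd]
  · simp [Bool.not_eq_true] at hd
    simp [hd]

theorem countP_space_eq (l : List Char) :
    l.countP (fun x => !PySem.Chars.isalpha x && !PySem.Chars.isdigit x && PySem.Chars.isspace x)
    = l.countP (fun x => PySem.Chars.isspace x) := by
  apply List.countP_congr
  intro x _
  by_cases hs : PySem.Chars.isspace x = true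
  · simp [hs, isalpha_of_isspace x hs, isdigit_of_isspace x hs]
  · simp [Bool.not_eq_true] at hs
    simp [hs]

-- ===== VERDICT (by name: the statement is the Claim_ definition above) =====
theorem staty_spec : Claim_equal_staty := by
  intro tekst _
  unfold Spec_staty staty staty_alt
  have hof : PySem.Dict.ofList [("litery", (0:Int)), ("cyfry", 0), ("spacje", 0), ("wyrazy", 0)]
      = PySem.Dict.mk [("litery", 0), ("cyfry", 0), ("spacje", 0), ("wyrazy", 0)] := rfl
  rw [hof, staty_loop]
  simp [PySem.Dict.insert, PySem.Dict.contains,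
    countP_digit_eq, countP_space_eq]
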